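-- pv_equiv track=rewrite | github.com/sparkyb/adventofcode | 2023/day21.py | simulate_block
-- ===== SOURCE A (Python) =====
-- def simulate_block(input, plots):
--   height = max(y for y, _ in input) + 1
--   width = max(x for _, x in input) + 1
--   prev_plots = frozenset()
--   counts = []
--   while plots:
--     counts.append(len(plots) + (counts[-2] if len(counts) > 1 else 0))
--     new_plots = frozenset(
--         (y + dy, x + dx)
--         for y, x in plots
--         for dy, dx in ((-1, 0), (1, 0), (0, -1), (0, 1))
--         if (y + dy, x + dx) in input
--         and (y + dy, x + dx) not in prev_plots
--     )
--     prev_plots = plots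
--     plots = new_plots
--   return counts
-- ===== SOURCE B (Python) =====
-- def simulate_block(input, plots):
--   cells = set(input)
--   dist = {}
--   queue = []
--   for y, x in plots:
--     dist[(y, x, 0)] = 0
--     queue.append((y, x, 0))
--   i = 0
--   while i < len(queue):
--     y, x, p = queue[i]
--     i += 1
--     d = dist[(y, x, p)]
--     for ny, nx in ((y - 1, x), (y + 1, x), (y, x - 1), (y, x + 1)):
--       if (ny, nx) in cells and (ny, nx, 1 - p) not in dist:
--         dist[(ny, nx, 1 - p)] = d + 1
--         queue.append((ny, nx, 1 - p))
--   sizes = {}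
--   for s in queue:
--     sizes[dist[s]] = sizes.get(dist[s], 0) + 1
--   counts = []
--   even = odd = 0
--   for d in range(len(sizes)):
--     s = sizes.get(d, 0)
--     if d % 2 == 0:
--       even += s
--       counts.append(even)
--     else:
--       odd += s
--       counts.append(odd)
--   return counts
-- ===== Notes on version B (the rewrite author's own statement) =====
-- stated objective: alternative
-- what changed: A simulates wavefronts: it keeps two whole frontier sets and rebuilds a frozenset of neighbours each round, appending len(frontier)+counts[-2] as it goes; B instead runs a single multi-source FIFO queue BFS over parity-augmented states (cell, step parity) with a first-visit distance dict (each state visited once, no layer sets), then builds the per-step counts afterwards from a distance histogram with two parity running sums; the two agree because A's frontier recurrence equals breadth-first layers on the bipartite double cover of the grid graph.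
-- crash fix: On empty input A's max(y for y, _ in input) raises ValueError; B returns [len(plots)] for nonempty plots (no move is ever possible) and [] for empty plots. — e.g. on simulate_block([], [(0, 0)]): A raises ValueError, B returns [1]
import Mathlib
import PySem

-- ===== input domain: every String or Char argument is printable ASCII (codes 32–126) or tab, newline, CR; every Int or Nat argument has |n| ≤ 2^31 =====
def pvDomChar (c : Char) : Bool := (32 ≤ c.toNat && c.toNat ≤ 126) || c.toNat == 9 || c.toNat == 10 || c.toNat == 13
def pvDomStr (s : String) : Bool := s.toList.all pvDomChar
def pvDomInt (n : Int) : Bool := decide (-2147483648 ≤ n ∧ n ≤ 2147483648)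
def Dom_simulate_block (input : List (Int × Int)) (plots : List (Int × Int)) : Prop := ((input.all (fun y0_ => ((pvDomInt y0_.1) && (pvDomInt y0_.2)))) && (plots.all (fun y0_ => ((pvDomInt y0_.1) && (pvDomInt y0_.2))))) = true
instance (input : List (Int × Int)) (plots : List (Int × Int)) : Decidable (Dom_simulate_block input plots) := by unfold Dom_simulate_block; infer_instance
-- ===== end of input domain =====

-- B replaces A's frontier-set simulation (two whole wavefront sets rebuilt each round, counts
-- appended inline via counts[-2]) by a single multi-source FIFO-queue BFS over parity-augmented
-- states (cell, step parity) with a first-visit distance dict, followed by a separate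
-- histogram-and-parity-prefix-sum pass that builds the counts; A raises ValueError on empty
-- `input` (excluded by Pre_), where B returns the counts directly.


-- ===== PORT A =====
-- the four directions ((-1, 0), (1, 0), (0, -1), (0, 1))
def pvDirs : List (Int × Int) := [(-1, 0), (1, 0), (0, -1), (0, 1)]

-- new_plots = frozenset((y+dy, x+dx) for y, x in plots for dy, dx in pvDirs
--                       if (y+dy, x+dx) in input and (y+dy, x+dx) not in prev_plots)
def pvNext (input prev_plots cur : List (Int × Int)) : List (Int × Int) :=
  PySem.Set.ofList
    ((cur.flatMap (fun p => pvDirs.map (fun d => (p.1 + d.1, p.2 + d.2)))).filter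
      (fun c => input.contains c && !(prev_plots.contains c)))

-- A's while loop; `fuel` only makes the recursion structural (the frontier dies out before
-- `plots.length + 2*input.length + 4` steps — proved below — so the fuel is never exhausted).
def pvLoopA (input : List (Int × Int)) : Nat → List (Int × Int) → List (Int × Int) → List Int → List Int
  | 0, _, _, counts => counts
  | fuel + 1, prev_plots, plots, counts =>
    if plots = [] then counts
    else
      -- counts.append(len(plots) + (counts[-2] if len(counts) > 1 else 0))
      let counts' := counts ++ [(plots.length : Int) +
        (if counts.length > 1 then PySem.List.pyGetD counts (-2) 0 else 0)]
      pvLoopA input fuel plots (pvNext input prev_plots plots) counts'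

def simulate_block (input : List (Int × Int)) (plots : List (Int × Int)) : List Int :=
  -- height = max(y for y, _ in input) + 1 ; width = max(x for _, x in input) + 1
  -- (the values are dead; max() raises ValueError on empty input — excluded by Pre_)
  match PySem.List.max? (input.map (fun p => p.1)) (fun y => y),
        PySem.List.max? (input.map (fun p => p.2)) (fun x => x) with
  | some _hm1, some _hm2 => pvLoopA input (plots.length + 2 * input.length + 4) [] plots []
  | _, _ => []  -- unreachable under Pre_ (ValueError)

-- ===== PORT B =====
-- the four neighbour cells of (y, x), in B's order
def pvNbr (y x : Int) : List (Int × Int) := [(y - 1, x), (y + 1, x), (y, x - 1), (y, x + 1)]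

-- B's queue loop (i is represented by splitting queue into done ++ pending); `fuel` only makes
-- the recursion structural: each state is enqueued at most once, so the queue never exceeds
-- plots.length + 2*input.length entries (proved below) and the fuel is never exhausted.
def pvBFS (cells : List (Int × Int)) : Nat → List (Int × Int × Int) → List (Int × Int × Int) →
    PySem.Dict (Int × Int × Int) Int → List (Int × Int × Int) × PySem.Dict (Int × Int × Int) Int
  | 0, done, pending, dist => (done ++ pending, dist)
  | fuel + 1, done, pending, dist =>
    match pending with
    | [] => (done, dist)
    | s :: rest =>
      let d := dist.getD s 0  -- dist[s]; the key is always present when s is reached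
      let st := (pvNbr s.1 s.2.1).foldl
        (fun (acc : List (Int × Int × Int) × PySem.Dict (Int × Int × Int) Int) c =>
          if cells.contains c && !(acc.2.contains (c.1, c.2, 1 - s.2.2)) then
            (acc.1 ++ [(c.1, c.2, 1 - s.2.2)], acc.2.insert (c.1, c.2, 1 - s.2.2) (d + 1))
          else acc) (rest, dist)
      pvBFS cells fuel (done ++ [s]) st.1 st.2

def simulate_block_alt (input : List (Int × Int)) (plots : List (Int × Int)) : List Int :=
  let cells := PySem.Set.ofList input
  -- for y, x in plots: dist[(y, x, 0)] = 0; queue.append((y, x, 0))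
  let seeded := plots.foldl
    (fun (acc : List (Int × Int × Int) × PySem.Dict (Int × Int × Int) Int) c =>
      (acc.1 ++ [(c.1, c.2, (0 : Int))], acc.2.insert (c.1, c.2, (0 : Int)) 0))
    ([], PySem.Dict.empty)
  let bfs := pvBFS cells (plots.length + 2 * input.length + 4) [] seeded.1 seeded.2
  -- for s in queue: sizes[dist[s]] = sizes.get(dist[s], 0) + 1
  let sizes := bfs.1.foldl
    (fun (sz : PySem.Dict Int Int) s =>
      sz.insert (bfs.2.getD s 0) (sz.getD (bfs.2.getD s 0) 0 + 1)) PySem.Dict.empty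
  -- for d in range(len(sizes)): parity running sums
  let res := (PySem.List.pyRange 0 (PySem.Dict.size sizes) 1).foldl
    (fun (acc : List Int × Int × Int) d =>
      let s := sizes.getD d 0
      if PySem.Int.mod d 2 == 0 then (acc.1 ++ [acc.2.1 + s], acc.2.1 + s, acc.2.2)
      else (acc.1 ++ [acc.2.2 + s], acc.2.1, acc.2.2 + s)) ([], 0, 0)
  res.1

-- ===== PRECONDITION & SPEC =====
-- Pre_ excludes exactly input = [], where A's max() raises ValueError (see Raises_ below).
def Pre_simulate_block (input : List (Int × Int)) (plots : List (Int × Int)) : Prop := input ≠ []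
instance (input : List (Int × Int)) (plots : List (Int × Int)) : Decidable (Pre_simulate_block input plots) := by unfold Pre_simulate_block; infer_instance

def pvWitness_simulate_block : (List (Int × Int)) × (List (Int × Int)) :=
  ([(0, 0), (0, 1), (1, 1)], [(0, 0)])

-- On empty `input` A's `max(y for y, _ in input)` raises ValueError; B returns the counts
-- ([len(plots)] for nonempty plots, [] for empty plots) since no move is ever possible.
def Raises_simulate_block (input : List (Int × Int)) (plots : List (Int × Int)) : Prop := input = []
instance (input : List (Int × Int)) (plots : List (Int × Int)) : Decidable (Raises_simulate_block input plots) := by unfold Raises_simulate_block; infer_instance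
def pvRaiseWitness_simulate_block : (List (Int × Int)) × (List (Int × Int)) := ([], [(0, 0)])
def pvRaiseWitnessOut_simulate_block : List Int := [1]

def Spec_simulate_block (input : List (Int × Int)) (plots : List (Int × Int)) (out : List Int) : Prop := out = simulate_block_alt input plots
instance (input : List (Int × Int)) (plots : List (Int × Int)) (out : List Int) : Decidable (Spec_simulate_block input plots out) := by unfold Spec_simulate_block; infer_instance

-- ===== CLAIM (what is proved, stated in full; the proofs are below) =====
def Claim_equal_simulate_block : Prop := ∀ (input : List (Int × Int)) (plots : List (Int × Int)), Dom_simulate_block input plots → Pre_simulate_block input plots → Spec_simulate_block input plots (simulate_block input plots)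
def Claim_raises_simulate_block : Prop := (∀ (input : List (Int × Int)) (plots : List (Int × Int)), Dom_simulate_block input plots → Raises_simulate_block input plots → ¬ Pre_simulate_block input plots) ∧ (Dom_simulate_block (pvRaiseWitness_simulate_block.1) (pvRaiseWitness_simulate_block.2) ∧ Raises_simulate_block (pvRaiseWitness_simulate_block.1) (pvRaiseWitness_simulate_block.2) ∧ simulate_block_alt (pvRaiseWitness_simulate_block.1) (pvRaiseWitness_simulate_block.2) = pvRaiseWitnessOut_simulate_block)

-- ===== LEMMAS AND PROOFS =====

-- ---------- the layer model of A's loop ----------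

-- (prev layer, current layer) after k rounds of A's loop
def pvLP (input plots : List (Int × Int)) : Nat → List (Int × Int) × List (Int × Int)
  | 0 => ([], plots)
  | k + 1 => ((pvLP input plots k).2, pvNext input (pvLP input plots k).1 (pvLP input plots k).2)

def pvL (input plots : List (Int × Int)) (k : Nat) : List (Int × Int) := (pvLP input plots k).2

-- grid adjacency
def pvAdj (a b : Int × Int) : Prop :=
  b = (a.1 - 1, a.2) ∨ b = (a.1 + 1, a.2) ∨ b = (a.1, a.2 - 1) ∨ b = (a.1, a.2 + 1)

-- parity of layer k as the Int that B stores in the third component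
def pvPar (k : Nat) : Int := if k % 2 = 0 then 0 else 1

-- state s belongs to layer k (cell in A's layer k, parity component = k mod 2)
def pvInL (input plots : List (Int × Int)) (k : Nat) (s : Int × Int × Int) : Prop :=
  (s.1, s.2.1) ∈ pvL input plots k ∧ s.2.2 = pvPar k

-- state visited within the first k layers
def pvVis (input plots : List (Int × Int)) (k : Nat) (s : Int × Int × Int) : Prop :=
  ∃ j, j ≤ k ∧ pvInL input plots j s

-- state-level adjacency (cell adjacency + parity flip)
def pvAdjS (s t : Int × Int × Int) : Prop :=
  pvAdj (s.1, s.2.1) (t.1, t.2.1) ∧ t.2.2 = 1 - s.2.2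

lemma pvL_zero (input plots : List (Int × Int)) : pvL input plots 0 = plots := rfl

lemma pvL_succ (input plots : List (Int × Int)) (k : Nat) :
    pvL input plots (k + 1) = pvNext input (pvLP input plots k).1 (pvL input plots k) := rfl

lemma pvLP_fst (input plots : List (Int × Int)) (k : Nat) :
    (pvLP input plots (k + 1)).1 = pvL input plots k := rfl

lemma mem_pvNext (input prev cur : List (Int × Int)) (c : Int × Int) :
    c ∈ pvNext input prev cur ↔ (∃ q ∈ cur, pvAdj q c) ∧ c ∈ input ∧ c ∉ prev := by
  simp only [pvNext, PySem.Set.mem_ofList, List.mem_filter, List.mem_flatMap, List.mem_map,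
    Bool.and_eq_true, Bool.not_eq_eq_eq_not, Bool.not_true, List.contains_eq_mem,
    decide_eq_true_eq, decide_eq_false_iff_not, pvDirs, pvAdj]
  constructor
  · rintro ⟨⟨q, hq, d, hd, rfl⟩, h1, h2⟩
    refine ⟨⟨q, hq, ?_⟩, h1, h2⟩
    simp only [List.mem_cons, List.not_mem_nil, or_false] at hd
    rcases hd with h | h | h | h <;> subst h <;> dsimp only <;>
      simp [Prod.ext_iff, sub_eq_add_neg]
  · rintro ⟨⟨q, hq, hadj⟩, h1, h2⟩
    refine ⟨⟨q, hq, ?_⟩, h1, h2⟩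
    rcases hadj with h | h | h | h <;> subst h
    · exact ⟨(-1, 0), by simp, by simp [Prod.ext_iff, sub_eq_add_neg]⟩
    · exact ⟨(1, 0), by simp, by simp⟩
    · exact ⟨(0, -1), by simp, by simp [Prod.ext_iff, sub_eq_add_neg]⟩
    · exact ⟨(0, 1), by simp, by simp⟩

lemma pvAdj_symm {a b : Int × Int} (h : pvAdj a b) : pvAdj b a := by
  obtain ⟨a1, a2⟩ := a; obtain ⟨b1, b2⟩ := b
  simp only [pvAdj, Prod.mk.injEq] at h ⊢
  rcases h with ⟨h1, h2⟩ | ⟨h1, h2⟩ | ⟨h1, h2⟩ | ⟨h1, h2⟩ <;> [right;left;right;right] <;>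
    first
      | (constructor <;> omega)
      | (left; constructor <;> omega)
      | (right; left; constructor <;> omega)
      | (right; right; constructor <;> omega)

lemma pvPar_succ (k : Nat) : pvPar (k + 1) = 1 - pvPar k := by
  simp only [pvPar, Nat.succ_mod_two_eq_zero_iff]
  by_cases h : k % 2 = 0 <;> simp [h, Nat.mod_two_ne_zero] <;> omega

lemma pvPar_eq_iff (j k : Nat) : pvPar j = pvPar k ↔ j % 2 = k % 2 := by
  simp only [pvPar]; split_ifs with h1 h2 h2 <;> omega

lemma pvL_nodup (input plots : List (Int × Int)) (k : Nat) (hk : 1 ≤ k) :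
    (pvL input plots k).Nodup := by
  obtain ⟨k, rfl⟩ := Nat.exists_eq_add_of_le hk
  rw [Nat.add_comm, pvL_succ]
  exact PySem.Set.nodup_ofList _

lemma pvL_sub_input (input plots : List (Int × Int)) (k : Nat) (hk : 1 ≤ k)
    (c : Int × Int) (hc : c ∈ pvL input plots k) : c ∈ input := by
  obtain ⟨k, rfl⟩ := Nat.exists_eq_add_of_le hk
  rw [Nat.add_comm, pvL_succ, mem_pvNext] at hc
  exact hc.2.1

lemma pvPar_vals (k : Nat) : pvPar k = 0 ∨ pvPar k = 1 := by
  unfold pvPar; split_ifs <;> simp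

-- the heart of the equivalence: a state adjacent to layer k that was already visited lies in
-- layer k-1 (F2), hence layer k+1 is disjoint from everything visited so far (F1)
lemma pvCore (input plots : List (Int × Int)) : ∀ k : Nat,
    (∀ s t : Int × Int × Int, (t.1, t.2.1) ∈ input → pvInL input plots k s → pvAdjS s t →
        pvVis input plots k t → 1 ≤ k ∧ pvInL input plots (k - 1) t) ∧
    (∀ t, pvInL input plots (k + 1) t → ¬ pvVis input plots k t) := by
  intro k
  induction k using Nat.strong_induction_on with
  | _ k ih =>
    have h2 : ∀ s t : Int × Int × Int, (t.1, t.2.1) ∈ input → pvInL input plots k s →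
        pvAdjS s t → pvVis input plots k t → 1 ≤ k ∧ pvInL input plots (k - 1) t := by
      intro s t hin hs hadj hvis
      obtain ⟨j, hj, hjt⟩ := hvis
      have hts : t.2.2 = 1 - pvPar k := by rw [hadj.2, hs.2]
      have hpar : pvPar j = 1 - pvPar k := by rw [← hjt.2, hts]
      have hjk : j % 2 ≠ k % 2 := by
        intro h
        have := (pvPar_eq_iff j k).2 h
        rcases pvPar_vals k with hv | hv <;> rw [hv] at hpar this <;> omega
      rcases Nat.eq_zero_or_pos k with rfl | hk1
      · omega
      · have hjle : j ≤ k - 1 := by omega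
        have hsin : (s.1, s.2.1) ∈ input := pvL_sub_input input plots k hk1 _ hs.1
        have hadj' : pvAdjS t s := by
          refine ⟨pvAdj_symm hadj.1, ?_⟩
          rw [hts, hs.2]; rcases pvPar_vals k with hv | hv <;> rw [hv] <;> ring
        by_cases hsv : pvVis input plots j s
        · obtain ⟨hj1, hsl⟩ := (ih j (by omega)).1 t s hsin hjt hadj' hsv
          exact absurd ⟨j - 1, by omega, hsl⟩
            ((ih (k - 1) (by omega)).2 s (by rwa [Nat.sub_add_cancel hk1]))
        · -- s belongs to layer j+1
          have hspar : s.2.2 = pvPar (j + 1) := by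
            rw [hs.2, (pvPar_eq_iff (j+1) k).2 (by omega)]
          have hsj1 : pvInL input plots (j + 1) s := by
            refine ⟨?_, hspar⟩
            rw [pvL_succ, mem_pvNext]
            refine ⟨⟨(t.1, t.2.1), hjt.1, pvAdj_symm hadj.1⟩, hsin, ?_⟩
            intro hmem
            cases j with
            | zero => simp [pvLP] at hmem
            | succ jj =>
              rw [pvLP_fst] at hmem
              refine hsv ⟨jj, by omega, hmem, ?_⟩
              rw [hs.2, (pvPar_eq_iff jj k).2 (by omega)]
          rcases Nat.lt_or_ge (j + 1) k with hlt | hge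
          · exact absurd ⟨j + 1, by omega, hsj1⟩
              ((ih (k - 1) (by omega)).2 s (by rwa [Nat.sub_add_cancel hk1]))
          · have : j + 1 = k := by omega
            exact ⟨hk1, by rw [(by omega : k - 1 = j)]; exact hjt⟩
    refine ⟨h2, ?_⟩
    intro t ht hvis
    have hcell := ht.1
    rw [pvL_succ, mem_pvNext] at hcell
    obtain ⟨⟨q, hqL, hadj⟩, hin, hnp⟩ := hcell
    have hs : pvInL input plots k (q.1, q.2, pvPar k) := ⟨by simpa using hqL, rfl⟩
    have hadjS : pvAdjS (q.1, q.2, pvPar k) t := by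
      refine ⟨by simpa using hadj, ?_⟩
      rw [ht.2, pvPar_succ]
    obtain ⟨hk1, hl⟩ := h2 _ t hin hs hadjS hvis
    apply hnp
    cases k with
    | zero => omega
    | succ kk => rw [pvLP_fst]; simpa using hl.1

lemma pvDisjL (input plots : List (Int × Int)) {j k : Nat} (h : j < k)
    {s : Int × Int × Int} (hk : pvInL input plots k s) : ¬ pvInL input plots j s := by
  intro hj
  cases k with
  | zero => omega
  | succ kk => exact (pvCore input plots kk).2 s hk ⟨j, by omega, hj⟩

-- layer k+1 characterised: in input, adjacent to a layer-k state, not yet visited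
lemma pvNChar (input plots : List (Int × Int)) (k : Nat) (t : Int × Int × Int) :
    pvInL input plots (k + 1) t ↔
      ((t.1, t.2.1) ∈ input ∧ (∃ s, pvInL input plots k s ∧ pvAdjS s t) ∧
        ¬ pvVis input plots k t) := by
  constructor
  · intro ht
    have hcell := ht.1
    rw [pvL_succ, mem_pvNext] at hcell
    obtain ⟨⟨q, hqL, hadj⟩, hin, _⟩ := hcell
    refine ⟨hin, ⟨(q.1, q.2, pvPar k), ⟨by simpa using hqL, rfl⟩, by simpa [pvAdjS, pvPar_succ, ht.2] using hadj⟩,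
      (pvCore input plots k).2 t ht⟩
  · rintro ⟨hin, ⟨s, hs, hadj⟩, hnv⟩
    have hpar : t.2.2 = pvPar (k + 1) := by rw [hadj.2, hs.2, pvPar_succ]
    refine ⟨?_, hpar⟩
    rw [pvL_succ, mem_pvNext]
    refine ⟨⟨(s.1, s.2.1), hs.1, hadj.1⟩, hin, ?_⟩
    intro hmem
    cases k with
    | zero => simp [pvLP] at hmem
    | succ kk =>
      rw [pvLP_fst] at hmem
      refine hnv ⟨kk, by omega, hmem, ?_⟩
      rw [hpar, (pvPar_eq_iff (kk+1+1) kk).2 (by omega)]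

-- ---------- counting: layers are finitely many, bounding both fuels ----------

def pvStates (input plots : List (Int × Int)) : Nat → List (Int × Int × Int)
  | 0 => PySem.Set.ofList (plots.map (fun c => (c.1, c.2, (0 : Int))))
  | j + 1 => (pvL input plots (j + 1)).map (fun c => (c.1, c.2, pvPar (j + 1)))

lemma pvPar_zero : pvPar 0 = 0 := rfl

lemma mem_pvStates (input plots : List (Int × Int)) (j : Nat) (s : Int × Int × Int) :
    s ∈ pvStates input plots j ↔ pvInL input plots j s := by
  obtain ⟨y, x, p⟩ := s
  cases j with
  | zero =>
    simp only [pvStates, PySem.Set.mem_ofList, List.mem_map, pvInL, pvL_zero, pvPar_zero]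
    constructor
    · rintro ⟨c, hc, h⟩
      simp only [Prod.mk.injEq] at h
      obtain ⟨h1, h2, h3⟩ := h; subst h1; subst h2; subst h3
      exact ⟨by simpa using hc, by simp⟩
    · rintro ⟨h1, h2⟩
      exact ⟨(y, x), by simpa using h1, by simp at h2 ⊢; omega⟩
  | succ jj =>
    simp only [pvStates, List.mem_map, pvInL]
    constructor
    · rintro ⟨c, hc, h⟩
      simp only [Prod.mk.injEq] at h
      obtain ⟨h1, h2, h3⟩ := h; subst h1; subst h2; subst h3
      exact ⟨by simpa using hc, rfl⟩
    · rintro ⟨h1, h2⟩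
      exact ⟨(y, x), by simpa using h1, by simp [h2]⟩

lemma nodup_pvStates (input plots : List (Int × Int)) (j : Nat) :
    (pvStates input plots j).Nodup := by
  cases j with
  | zero => exact PySem.Set.nodup_ofList _
  | succ jj =>
    refine (pvL_nodup input plots (jj+1) (by omega)).map ?_
    intro a b h
    simp only [Prod.mk.injEq] at h
    exact Prod.ext h.1 h.2.1

lemma pvStates_ne_nil (input plots : List (Int × Int)) (j : Nat)
    (h : pvL input plots j ≠ []) : pvStates input plots j ≠ [] := by
  obtain ⟨c, hc⟩ := List.exists_mem_of_ne_nil _ h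
  exact List.ne_nil_of_mem ((mem_pvStates input plots j (c.1, c.2, pvPar j)).2
    ⟨by simpa using hc, rfl⟩)

def pvCat (input plots : List (Int × Int)) (off r : Nat) : List (Int × Int × Int) :=
  (List.range r).flatMap (fun i => pvStates input plots (off + i))

lemma mem_pvCat (input plots : List (Int × Int)) (off r : Nat) (s : Int × Int × Int) :
    s ∈ pvCat input plots off r ↔ ∃ i < r, pvInL input plots (off + i) s := by
  simp [pvCat, List.mem_flatMap, List.mem_range, mem_pvStates]

lemma nodup_pvCat (input plots : List (Int × Int)) (off r : Nat) :
    (pvCat input plots off r).Nodup := by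
  induction r with
  | zero => simp [pvCat]
  | succ r ih =>
    have : pvCat input plots off (r+1) = pvCat input plots off r ++ pvStates input plots (off + r) := by
      simp [pvCat, List.range_succ]
    rw [this, List.nodup_append]
    refine ⟨ih, nodup_pvStates input plots _, ?_⟩
    intro t ht t' ht' heq
    subst heq
    rw [mem_pvCat] at ht
    obtain ⟨i, hi, hil⟩ := ht
    exact pvDisjL input plots (show off + i < off + r by omega)
      ((mem_pvStates _ _ _ _).1 ht') hil

-- all states live in a fixed finite list
def pvBig (input plots : List (Int × Int)) : List (Int × Int × Int) :=
  plots.map (fun c => (c.1, c.2, (0 : Int))) ++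
    input.flatMap (fun c => [(c.1, c.2, (0 : Int)), (c.1, c.2, (1 : Int))])

lemma pvBig_length (input plots : List (Int × Int)) :
    (pvBig input plots).length = plots.length + 2 * input.length := by
  unfold pvBig
  rw [List.length_append, List.length_map]
  congr 1
  induction input with
  | nil => rfl
  | cons c t ih => simp [List.flatMap_cons, ih]; omega

lemma pvInL_mem_big (input plots : List (Int × Int)) (j : Nat) (s : Int × Int × Int)
    (h : pvInL input plots j s) : s ∈ pvBig input plots := by
  obtain ⟨y, x, p⟩ := s
  unfold pvBig
  rw [List.mem_append]
  cases j with
  | zero =>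
    left
    have h1 := h.1
    have h2 := h.2
    simp only [pvPar] at h2
    simp only [List.mem_map]
    exact ⟨(y, x), by simpa using h1, by simp at h2 ⊢; omega⟩
  | succ jj =>
    right
    have h1 := pvL_sub_input input plots (jj+1) (by omega) _ h.1
    have h2 := h.2
    rw [List.mem_flatMap]
    refine ⟨(y, x), by simpa using h1, ?_⟩
    rcases pvPar_vals (jj+1) with hv | hv <;> rw [hv] at h2 <;> simp at h2 ⊢ <;> simp [h2]

lemma pvNodup_sub_length {l L : List (Int × Int × Int)} (h : l.Nodup)
    (hs : ∀ x ∈ l, x ∈ L) : l.length ≤ L.length := by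
  calc l.length = l.toFinset.card := (List.toFinset_card_of_nodup h).symm
    _ ≤ L.toFinset.card := Finset.card_le_card
        (fun x hx => List.mem_toFinset.2 (hs x (List.mem_toFinset.1 hx)))
    _ ≤ L.length := L.toFinset_card_le

lemma pvCat_le (input plots : List (Int × Int)) (off r : Nat) :
    (pvCat input plots off r).length ≤ plots.length + 2 * input.length := by
  rw [← pvBig_length input plots]
  refine pvNodup_sub_length (nodup_pvCat input plots off r) ?_
  intro t ht
  rw [mem_pvCat] at ht
  obtain ⟨i, _, hil⟩ := ht
  exact pvInL_mem_big input plots _ t hil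

lemma pvCat_ge (input plots : List (Int × Int)) (r : Nat)
    (h : ∀ j < r, pvL input plots j ≠ []) : r ≤ (pvCat input plots 0 r).length := by
  induction r with
  | zero => simp
  | succ r ih =>
    have hsp : pvCat input plots 0 (r+1) = pvCat input plots 0 r ++ pvStates input plots r := by
      simp [pvCat, List.range_succ]
    rw [hsp, List.length_append]
    have h1 := ih (fun j hj => h j (by omega))
    have h2 : 1 ≤ (pvStates input plots r).length :=
      List.length_pos_of_ne_nil (pvStates_ne_nil input plots r (h r (by omega)))
    omega

lemma pvL_empty_succ (input plots : List (Int × Int)) (r : Nat)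
    (h : pvL input plots r = []) : pvL input plots (r + 1) = [] := by
  rw [pvL_succ, h]; rfl

lemma pvL_empty_mono (input plots : List (Int × Int)) {r r' : Nat} (hr : r ≤ r')
    (h : pvL input plots r = []) : pvL input plots r' = [] := by
  obtain ⟨d, rfl⟩ := Nat.exists_eq_add_of_le hr
  induction d with
  | zero => exact h
  | succ d ih =>
    rw [← Nat.add_assoc]
    exact pvL_empty_succ input plots _ (ih (Nat.le_add_right r d))

lemma pvEmpty_exists (input plots : List (Int × Int)) : ∃ r, pvL input plots r = [] := by
  by_contra hc
  push_neg at hc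
  have h1 := pvCat_ge input plots (plots.length + 2 * input.length + 1) (fun j _ => hc j)
  have h2 := pvCat_le input plots 0 (plots.length + 2 * input.length + 1)
  omega

-- the number of nonempty layers
def pvM (input plots : List (Int × Int)) : Nat := Nat.find (pvEmpty_exists input plots)

lemma pvM_empty (input plots : List (Int × Int)) : pvL input plots (pvM input plots) = [] :=
  Nat.find_spec (pvEmpty_exists input plots)

lemma pvM_ne (input plots : List (Int × Int)) {k : Nat} (h : k < pvM input plots) :
    pvL input plots k ≠ [] := Nat.find_min (pvEmpty_exists input plots) h

lemma pvM_empty_ge (input plots : List (Int × Int)) {k : Nat} (h : pvM input plots ≤ k) :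
    pvL input plots k = [] := pvL_empty_mono input plots h (pvM_empty input plots)

lemma pvM_le (input plots : List (Int × Int)) :
    pvM input plots ≤ plots.length + 2 * input.length + 1 := by
  by_contra hc
  push_neg at hc
  have h1 := pvCat_ge input plots (plots.length + 2 * input.length + 2)
    (fun j hj => pvM_ne input plots (by omega))
  have h2 := pvCat_le input plots 0 (plots.length + 2 * input.length + 2)
  omega

-- total size of the layers from 1 on (bounds B's queue growth)
lemma pvSum_le (input plots : List (Int × Int)) (g : Nat) :
    ((List.range g).map (fun i => (pvL input plots (1 + i)).length)).sum ≤ 2 * input.length := by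
  have hlen : ((List.range g).map (fun i => (pvL input plots (1 + i)).length)).sum
      = (pvCat input plots 1 g).length := by
    unfold pvCat
    rw [List.length_flatMap]
    congr 1
    refine List.map_congr_left ?_
    intro i hi
    rw [(by omega : 1 + i = i + 1)]
    simp only [pvStates, List.length_map]
  rw [hlen]
  have hb : (pvCat input plots 1 g).length ≤ (input.flatMap (fun c => [(c.1, c.2, (0 : Int)), (c.1, c.2, (1 : Int))])).length := by
    refine pvNodup_sub_length (nodup_pvCat input plots 1 g) ?_
    intro t ht
    rw [mem_pvCat] at ht
    obtain ⟨i, _, hil⟩ := ht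
    have := pvInL_mem_big input plots (1 + i) t hil
    unfold pvBig at this
    rw [List.mem_append] at this
    rcases this with hmem | hmem
    · -- a layer ≥ 1 state lies in input, so it is also in the flatMap part
      obtain ⟨y, x, p⟩ := t
      have h1 := pvL_sub_input input plots (1 + i) (by omega) _ hil.1
      have h2 := hil.2
      rw [List.mem_flatMap]
      refine ⟨(y, x), by simpa using h1, ?_⟩
      rcases pvPar_vals (1 + i) with hv | hv <;> rw [hv] at h2 <;> simp at h2 ⊢ <;> simp [h2]
    · exact hmem
  have : (input.flatMap (fun c => [(c.1, c.2, (0 : Int)), (c.1, c.2, (1 : Int))])).length = 2 * input.length := by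
    induction input with
    | nil => rfl
    | cons c t ih => simp [List.flatMap_cons, ih]; omega
  omega

-- ---------- parity prefix sums (shared aggregation model) ----------

-- one step of the parity-running-sum pass (state = (counts, even, odd), item = (i, s))
def pvStep (st : List Int × Int × Int) (is : Int × Int) : List Int × Int × Int :=
  if PySem.Int.mod is.1 2 == 0 then (st.1 ++ [st.2.1 + is.2], st.2.1 + is.2, st.2.2)
  else (st.1 ++ [st.2.2 + is.2], st.2.1, st.2.2 + is.2)

def pvPass2 (sizes : List Int) : List Int × Int × Int :=
  (PySem.List.enumerate sizes 0).foldl pvStep ([], 0, 0)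

-- counts[-2] of a list extended on the right is the old counts[-1]
lemma pvGet2_append (c : List Int) (x : Int) :
    PySem.List.pyGetD (c ++ [x]) (-2) 0 = PySem.List.pyGetD c (-1) 0 := by
  simp [PySem.List.pyGetD, PySem.List.pyGet?, PySem.List.pyIdx?]
  split_ifs with h
  · simp only [Option.bind_some]
    rw [List.getElem?_append_left (by omega : c.length - 1 < c.length)]
  · rfl

-- counts[-2] with fewer than two elements defaults to 0, so A's guard is redundant
lemma pvGet2_short (c : List Int) (h : c.length ≤ 1) : PySem.List.pyGetD c (-2) 0 = 0 := by
  simp [PySem.List.pyGetD, PySem.List.pyGet?, PySem.List.pyIdx?]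
  rw [if_neg (by omega)]; rfl

lemma pvPen_eq (c : List Int) :
    (if c.length > 1 then PySem.List.pyGetD c (-2) 0 else 0) = PySem.List.pyGetD c (-2) 0 := by
  split_ifs with h
  · rfl
  · exact (pvGet2_short c (by omega)).symm

lemma pvEnum_append (l : List Int) (x : Int) (s : Int) :
    PySem.List.enumerate (l ++ [x]) s = PySem.List.enumerate l s ++ [(s + l.length, x)] := by
  induction l generalizing s with
  | nil => simp [PySem.List.enumerate]
  | cons a t ih => simp [PySem.List.enumerate, ih]; ring_nf

lemma pvPass2_append (s : List Int) (n : Int) :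
    pvPass2 (s ++ [n]) = pvStep (pvPass2 s) ((s.length : Int), n) := by
  unfold pvPass2
  rw [pvEnum_append, List.foldl_append]
  simp

-- invariant of the pass: length, and counts[-2]/counts[-1] are the parity sums
lemma pvPass2_inv (s : List Int) :
    (pvPass2 s).1.length = s.length ∧
    PySem.List.pyGetD (pvPass2 s).1 (-2) 0 =
      (if s.length % 2 = 0 then (pvPass2 s).2.1 else (pvPass2 s).2.2) ∧
    PySem.List.pyGetD (pvPass2 s).1 (-1) 0 =
      (if s.length % 2 = 0 then (pvPass2 s).2.2 else (pvPass2 s).2.1) := by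
  induction s using List.reverseRecOn with
  | nil => decide
  | append_singleton s x ih =>
    obtain ⟨h1, h2, h3⟩ := ih
    rw [pvPass2_append]
    unfold pvStep
    have hmod : PySem.Int.mod ((s.length : Nat) : Int) 2 = (((s.length % 2 : Nat)) : Int) := by
      exact_mod_cast PySem.Int.mod_natCast s.length 2
    by_cases hp : s.length % 2 = 0
    · simp only [hmod, hp]
      simp [pvGet2_append, h1, h3, hp, Nat.add_mod, List.length_append]
    · have hp1 : s.length % 2 = 1 := by omega
      simp only [hmod, hp1]
      simp [pvGet2_append, h1, h3, hp1, Nat.add_mod, List.length_append]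

-- appending one layer count the way A does extends the parity prefix sums
lemma pvPass2_snoc_count (sizes : List Int) (n : Int) :
    (pvPass2 sizes).1 ++ [n + (if (pvPass2 sizes).1.length > 1
        then PySem.List.pyGetD (pvPass2 sizes).1 (-2) 0 else 0)]
      = (pvPass2 (sizes ++ [n])).1 := by
  obtain ⟨h1, h2, h3⟩ := pvPass2_inv sizes
  rw [pvPass2_append]
  unfold pvStep
  have hmod : PySem.Int.mod ((sizes.length : Nat) : Int) 2 = (((sizes.length % 2 : Nat)) : Int) := by
    exact_mod_cast PySem.Int.mod_natCast sizes.length 2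
  rw [pvPen_eq, h2]
  by_cases hpar : sizes.length % 2 = 0
  · simp only [hmod, hpar]; simp [add_comm]
  · have hp1 : sizes.length % 2 = 1 := by omega
    simp only [hmod, hp1]; simp [add_comm]

-- ---------- A's loop computes the parity prefix sums of the layer sizes ----------

def pvLens (input plots : List (Int × Int)) : Nat → Nat → List Int
  | _, 0 => []
  | k, fuel + 1 =>
    if pvL input plots k = [] then []
    else ((pvL input plots k).length : Int) :: pvLens input plots (k + 1) fuel

lemma pvLoopA_eq (input plots : List (Int × Int)) :
    ∀ (fuel k : Nat) (sizes : List Int),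
    pvLoopA input fuel (pvLP input plots k).1 (pvL input plots k) (pvPass2 sizes).1
      = (pvPass2 (sizes ++ pvLens input plots k fuel)).1 := by
  intro fuel
  induction fuel with
  | zero => intro k sizes; simp [pvLoopA, pvLens]
  | succ fuel ih =>
    intro k sizes
    rw [pvLoopA, pvLens]
    by_cases h : pvL input plots k = []
    · simp [h]
    · rw [if_neg h, if_neg h]
      have hstep : (pvPass2 sizes).1 ++ [((pvL input plots k).length : Int) +
          (if (pvPass2 sizes).1.length > 1 then PySem.List.pyGetD (pvPass2 sizes).1 (-2) 0 else 0)]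
          = (pvPass2 (sizes ++ [((pvL input plots k).length : Int)])).1 :=
        pvPass2_snoc_count sizes _
      show pvLoopA input fuel (pvL input plots k)
          (pvNext input (pvLP input plots k).1 (pvL input plots k))
          ((pvPass2 sizes).1 ++ [((pvL input plots k).length : Int) +
            (if (pvPass2 sizes).1.length > 1 then PySem.List.pyGetD (pvPass2 sizes).1 (-2) 0 else 0)])
        = _
      rw [hstep, ← pvL_succ]
      have hih := ih (k+1) (sizes ++ [((pvL input plots k).length : Int)])
      rw [pvLP_fst] at hih
      rw [hih]
      simp

lemma pvLens_spec (input plots : List (Int × Int)) :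
    ∀ (fuel k : Nat), pvM input plots ≤ k + fuel →
    pvLens input plots k fuel
      = (List.range (pvM input plots - k)).map (fun i => ((pvL input plots (k + i)).length : Int)) := by
  intro fuel
  induction fuel with
  | zero =>
    intro k hk
    rw [pvLens, (by omega : pvM input plots - k = 0)]
    rfl
  | succ fuel ih =>
    intro k hk
    rw [pvLens]
    by_cases h : pvL input plots k = []
    · have hk' : pvM input plots ≤ k := by
        by_contra hc
        exact pvM_ne input plots (by omega) h
      rw [(by omega : pvM input plots - k = 0)]
      simp [h]
    · have hkM : k < pvM input plots := by
        by_contra hc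
        exact h (pvM_empty_ge input plots (by omega))
      rw [if_neg h, ih (k+1) (by omega)]
      rw [(by omega : pvM input plots - k = (pvM input plots - (k+1)) + 1)]
      rw [List.range_succ_eq_map]
      simp only [List.map_cons, List.map_map, Nat.add_zero]
      congr 1
      refine List.map_congr_left ?_
      intro i _
      simp only [Function.comp]
      rw [show k + 1 + i = k + i.succ by omega]

-- ---------- B's BFS: small auxiliary lemmas ----------

lemma pvVis_succ (input plots : List (Int × Int)) (k : Nat) (t : Int × Int × Int) :
    pvVis input plots (k + 1) t ↔ pvVis input plots k t ∨ pvInL input plots (k + 1) t := by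
  constructor
  · rintro ⟨j, hj, hjt⟩
    rcases Nat.lt_or_ge j (k + 1) with h | h
    · exact Or.inl ⟨j, by omega, hjt⟩
    · exact Or.inr (by rwa [(by omega : j = k + 1)] at hjt)
  · rintro (⟨j, hj, hjt⟩ | h)
    · exact ⟨j, by omega, hjt⟩
    · exact ⟨k + 1, le_refl _, h⟩

lemma pvVis_zero (input plots : List (Int × Int)) (t : Int × Int × Int) :
    pvVis input plots 0 t ↔ pvInL input plots 0 t := by
  constructor
  · rintro ⟨j, hj, hjt⟩; rwa [(by omega : j = 0)] at hjt
  · intro h; exact ⟨0, le_refl _, h⟩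

lemma pvBFS_nil (cells : List (Int × Int)) (fuel : Nat) (done : List (Int × Int × Int))
    (dist : PySem.Dict (Int × Int × Int) Int) : pvBFS cells fuel done [] dist = (done, dist) := by
  cases fuel with
  | zero => simp [pvBFS]
  | succ f => rfl

lemma pvNbr_mem (y x : Int) (c : Int × Int) : c ∈ pvNbr y x ↔ pvAdj (y, x) c := by
  simp [pvNbr, pvAdj]

lemma pvNbr_nodup (y x : Int) : (pvNbr y x).Nodup := by
  simp [pvNbr, Prod.ext_iff]
  omega

-- the inner for-loop over the four neighbours, characterised
lemma pvFoldStep (cells : List (Int × Int)) (p dd : Int) :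
    ∀ (L : List (Int × Int)) (q : List (Int × Int × Int)) (dist : PySem.Dict (Int × Int × Int) Int),
    L.Nodup →
    ((L.foldl (fun acc c =>
        if cells.contains c && !(acc.2.contains (c.1, c.2, 1 - p)) then
          (acc.1 ++ [(c.1, c.2, 1 - p)], acc.2.insert (c.1, c.2, 1 - p) (dd + 1))
        else acc) (q, dist)).1
      = q ++ (L.filter (fun c => cells.contains c && !(dist.contains (c.1, c.2, 1 - p)))).map
          (fun c => (c.1, c.2, 1 - p))) ∧
    (∀ t, (L.foldl (fun acc c =>
        if cells.contains c && !(acc.2.contains (c.1, c.2, 1 - p)) then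
          (acc.1 ++ [(c.1, c.2, 1 - p)], acc.2.insert (c.1, c.2, 1 - p) (dd + 1))
        else acc) (q, dist)).2.get? t
      = if t ∈ (L.filter (fun c => cells.contains c && !(dist.contains (c.1, c.2, 1 - p)))).map
            (fun c => (c.1, c.2, 1 - p)) then some (dd + 1) else dist.get? t) := by
  intro L
  induction L with
  | nil => intro q dist _; simp
  | cons c L' ih =>
    intro q dist hnd
    obtain ⟨hc, hnd'⟩ := List.nodup_cons.1 hnd
    rw [List.foldl_cons, List.filter_cons]
    by_cases hb : (cells.contains c && !(dist.contains (c.1, c.2, 1 - p))) = true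
    · rw [if_pos hb, if_pos (by simpa using hb)]
      obtain ⟨ih1, ih2⟩ := ih (q ++ [(c.1, c.2, 1 - p)]) (dist.insert (c.1, c.2, 1 - p) (dd + 1)) hnd'
      have hfc : (L'.filter (fun c' => cells.contains c' &&
            !((dist.insert (c.1, c.2, 1 - p) (dd + 1)).contains (c'.1, c'.2, 1 - p))))
          = (L'.filter (fun c' => cells.contains c' && !(dist.contains (c'.1, c'.2, 1 - p)))) := by
        refine List.filter_congr ?_
        intro c' hc'
        have hne : ((c'.1, c'.2, 1 - p) : Int × Int × Int) ≠ (c.1, c.2, 1 - p) := by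
          intro h
          simp only [Prod.mk.injEq] at h
          exact hc (by rwa [(Prod.ext h.1 h.2.1 : c' = c)] at hc')
        rw [PySem.Dict.contains_insert]
        rw [beq_eq_false_iff_ne.2 hne]
        simp
      rw [hfc] at ih1 ih2
      constructor
      · rw [ih1, List.map_cons]
        simp
      · intro t
        rw [ih2 t, List.map_cons, PySem.Dict.get?_insert]
        by_cases h1 : t ∈ (L'.filter (fun c' => cells.contains c' &&
            !(dist.contains (c'.1, c'.2, 1 - p)))).map (fun c' => (c'.1, c'.2, 1 - p))
        · rw [if_pos h1, if_pos (List.mem_cons_of_mem _ h1)]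
        · rw [if_neg h1]
          by_cases h2 : t = (c.1, c.2, 1 - p)
          · rw [if_pos h2, if_pos (by simp [h2])]
          · rw [if_neg h2, if_neg (fun hmem => (List.mem_cons.1 hmem).elim h2 h1)]
    · rw [if_neg hb, if_neg (by simpa using hb)]
      exact ih q dist hnd'

-- the seeding loop, characterised
lemma pvSeeds (plots : List (Int × Int)) :
    ∀ (q0 : List (Int × Int × Int)) (d0 : PySem.Dict (Int × Int × Int) Int),
    ((plots.foldl (fun acc c => (acc.1 ++ [(c.1, c.2, (0 : Int))], acc.2.insert (c.1, c.2, (0 : Int)) 0))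
        (q0, d0)).1 = q0 ++ plots.map (fun c => (c.1, c.2, 0))) ∧
    (∀ t, (plots.foldl (fun acc c => (acc.1 ++ [(c.1, c.2, (0 : Int))], acc.2.insert (c.1, c.2, (0 : Int)) 0))
        (q0, d0)).2.get? t
      = if t ∈ plots.map (fun c => (c.1, c.2, (0 : Int))) then some 0 else d0.get? t) := by
  induction plots with
  | nil => intro q0 d0; simp
  | cons c L' ih =>
    intro q0 d0
    rw [List.foldl_cons]
    obtain ⟨ih1, ih2⟩ := ih (q0 ++ [(c.1, c.2, 0)]) (d0.insert (c.1, c.2, 0) 0)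
    constructor
    · rw [ih1, List.map_cons]; simp
    · intro t
      rw [ih2 t, List.map_cons, PySem.Dict.get?_insert]
      by_cases h1 : t ∈ L'.map (fun c' => ((c'.1, c'.2, (0 : Int)) : Int × Int × Int))
      · rw [if_pos h1, if_pos (List.mem_cons_of_mem _ h1)]
      · rw [if_neg h1]
        by_cases h2 : t = (c.1, c.2, 0)
        · rw [if_pos h2, if_pos (by simp [h2])]
        · rw [if_neg h2, if_neg (fun hmem => (List.mem_cons.1 hmem).elim h2 h1)]

-- processing one whole BFS layer
lemma pvBFS_layer (input plots : List (Int × Int)) (k : Nat) :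
    ∀ (P : List (Int × Int × Int)) (procd : (Int × Int × Int) → Prop)
      (Q done : List (Int × Int × Int)) (dist : PySem.Dict (Int × Int × Int) Int) (fuel : Nat),
    (∀ s ∈ P, pvInL input plots k s) →
    (∀ s, procd s → pvInL input plots k s) →
    (∀ s, pvInL input plots k s → procd s ∨ s ∈ P) →
    (∀ t, t ∈ Q ↔ ((t.1, t.2.1) ∈ input ∧ (∃ s, procd s ∧ pvAdjS s t) ∧ ¬ pvVis input plots k t)) →
    Q.Nodup →
    (∀ t, (dist.get? t).isSome = true ↔ (pvVis input plots k t ∨ t ∈ Q)) →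
    (∀ s ∈ P, dist.getD s 0 = (k : Int)) →
    (∀ t ∈ Q, dist.getD t 0 = ((k : Int) + 1)) →
    P.length ≤ fuel →
    ∃ (Q' : List (Int × Int × Int)) (dist' : PySem.Dict (Int × Int × Int) Int),
      pvBFS (PySem.Set.ofList input) fuel done (P ++ Q) dist
        = pvBFS (PySem.Set.ofList input) (fuel - P.length) (done ++ P) Q' dist' ∧
      (∀ t, t ∈ Q' ↔ pvInL input plots (k + 1) t) ∧
      Q'.Nodup ∧
      (∀ t, (dist'.get? t).isSome = true ↔ pvVis input plots (k + 1) t) ∧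
      (∀ t ∈ Q', dist'.getD t 0 = ((k : Int) + 1)) ∧
      (∀ t, (dist.get? t).isSome = true → dist'.get? t = dist.get? t) := by
  intro P
  induction P with
  | nil =>
    intro procd Q done dist fuel hP hprocd hcover hQ hQnd hdom hvalP hvalQ hfuel
    refine ⟨Q, dist, by simp, ?_, hQnd, ?_, hvalQ, fun t _ => rfl⟩
    · intro t
      rw [hQ t, pvNChar input plots k t]
      constructor
      · rintro ⟨h1, ⟨s, hs, hadj⟩, h3⟩
        exact ⟨h1, ⟨s, hprocd s hs, hadj⟩, h3⟩
      · rintro ⟨h1, ⟨s, hs, hadj⟩, h3⟩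
        rcases hcover s hs with h | h
        · exact ⟨h1, ⟨s, h, hadj⟩, h3⟩
        · exact absurd h (List.not_mem_nil)
    · intro t
      rw [hdom t, hQ t, pvVis_succ, pvNChar input plots k t]
      constructor
      · rintro (h | ⟨h1, ⟨s, hs, hadj⟩, h3⟩)
        · exact Or.inl h
        · exact Or.inr ⟨h1, ⟨s, hprocd s hs, hadj⟩, h3⟩
      · rintro (h | ⟨h1, ⟨s, hs, hadj⟩, h3⟩)
        · exact Or.inl h
        · rcases hcover s hs with h' | h'
          · exact Or.inr ⟨h1, ⟨s, h', hadj⟩, h3⟩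
          · exact absurd h' (List.not_mem_nil)
  | cons s P' ih =>
    intro procd Q done dist fuel hP hprocd hcover hQ hQnd hdom hvalP hvalQ hfuel
    obtain ⟨f, rfl⟩ : ∃ f, fuel = f + 1 := ⟨fuel - 1, by rw [List.length_cons] at hfuel; omega⟩
    have hsL : pvInL input plots k s := hP s (List.mem_cons_self)
    have hd : dist.getD s 0 = (k : Int) := hvalP s (List.mem_cons_self)
    -- one pvBFS step
    have hstep : pvBFS (PySem.Set.ofList input) (f + 1) done ((s :: P') ++ Q) dist
        = pvBFS (PySem.Set.ofList input) f (done ++ [s])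
            ((pvNbr s.1 s.2.1).foldl
              (fun acc c =>
                if List.contains (PySem.Set.ofList input) c && !(acc.2.contains (c.1, c.2, 1 - s.2.2)) then
                  (acc.1 ++ [(c.1, c.2, 1 - s.2.2)], acc.2.insert (c.1, c.2, 1 - s.2.2) (dist.getD s 0 + 1))
                else acc) (P' ++ Q, dist)).1
            ((pvNbr s.1 s.2.1).foldl
              (fun acc c =>
                if List.contains (PySem.Set.ofList input) c && !(acc.2.contains (c.1, c.2, 1 - s.2.2)) then
                  (acc.1 ++ [(c.1, c.2, 1 - s.2.2)], acc.2.insert (c.1, c.2, 1 - s.2.2) (dist.getD s 0 + 1))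
                else acc) (P' ++ Q, dist)).2 := rfl
    obtain ⟨hf1, hf2⟩ := pvFoldStep (PySem.Set.ofList input) s.2.2 (dist.getD s 0)
      (pvNbr s.1 s.2.1) (P' ++ Q) dist (pvNbr_nodup s.1 s.2.1)
    set news := ((pvNbr s.1 s.2.1).filter
        (fun c => List.contains (PySem.Set.ofList input) c && !(dist.contains (c.1, c.2, 1 - s.2.2)))).map
        (fun c => (c.1, c.2, 1 - s.2.2)) with hnews
    -- membership in news
    have hmemnews : ∀ t, t ∈ news ↔
        (pvAdjS s t ∧ (t.1, t.2.1) ∈ input ∧ dist.contains t = false) := by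
      intro t
      rw [hnews]
      simp only [List.mem_map, List.mem_filter, Bool.and_eq_true, Bool.not_eq_eq_eq_not,
        Bool.not_true]
      constructor
      · rintro ⟨c, ⟨hcn, hcin, hcd⟩, rfl⟩
        refine ⟨⟨(pvNbr_mem s.1 s.2.1 c).1 hcn, rfl⟩, ?_, hcd⟩
        simp only [List.contains_eq_mem, decide_eq_true_eq, PySem.Set.mem_ofList] at hcin
        exact hcin
      · rintro ⟨⟨hadj, hpar⟩, hin, hcd⟩
        refine ⟨(t.1, t.2.1), ⟨(pvNbr_mem s.1 s.2.1 _).2 hadj, ?_, ?_⟩, ?_⟩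
        · simp only [List.contains_eq_mem, decide_eq_true_eq, PySem.Set.mem_ofList]; exact hin
        · rw [show ((t.1, t.2.1).1, (t.1, t.2.1).2, 1 - s.2.2) = t from by
            refine Prod.ext rfl (Prod.ext rfl ?_); simp [hpar]]
          exact hcd
        · refine Prod.ext rfl (Prod.ext rfl ?_); simp [hpar]
    -- news is disjoint from everything already in dist
    have hnews_fresh : ∀ t ∈ news, (dist.get? t).isSome = false := by
      intro t ht
      rw [← PySem.Dict.contains_eq_isSome_get?]
      exact ((hmemnews t).1 ht).2.2
    have hnot_news : ∀ t, (dist.get? t).isSome = true → t ∉ news := by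
      intro t hsome ht
      rw [hnews_fresh t ht] at hsome
      exact Bool.false_ne_true hsome
    -- apply the induction hypothesis
    obtain ⟨Q', dist', heq, hmem', hnd', hdom'', hval'', hext'⟩ :=
      ih (fun u => procd u ∨ u = s) (Q ++ news) (done ++ [s])
        ((pvNbr s.1 s.2.1).foldl
          (fun acc c =>
            if List.contains (PySem.Set.ofList input) c && !(acc.2.contains (c.1, c.2, 1 - s.2.2)) then
              (acc.1 ++ [(c.1, c.2, 1 - s.2.2)], acc.2.insert (c.1, c.2, 1 - s.2.2) (dist.getD s 0 + 1))
            else acc) (P' ++ Q, dist)).2 f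
        (fun u hu => hP u (List.mem_cons_of_mem _ hu))
        (by rintro u (hu | rfl); exacts [hprocd u hu, hsL])
        (by
          intro u hu
          rcases hcover u hu with h | h
          · exact Or.inl (Or.inl h)
          · rcases List.mem_cons.1 h with rfl | h'
            · exact Or.inl (Or.inr rfl)
            · exact Or.inr h')
        (by
          intro t
          constructor
          · intro ht
            rcases List.mem_append.1 ht with hq | hn
            · obtain ⟨h1, ⟨u, hu, hadj⟩, h3⟩ := (hQ t).1 hq
              exact ⟨h1, ⟨u, Or.inl hu, hadj⟩, h3⟩
            · obtain ⟨hadj, hin, hcd⟩ := (hmemnews t).1 hn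
              refine ⟨hin, ⟨s, Or.inr rfl, hadj⟩, fun hv => ?_⟩
              have h1 := (hdom t).2 (Or.inl hv)
              rw [PySem.Dict.contains_eq_isSome_get?, h1] at hcd
              simp at hcd
          · rintro ⟨h1, ⟨u, hu, hadj⟩, h3⟩
            rcases hu with hu | rfl
            · exact List.mem_append_left _ ((hQ t).2 ⟨h1, ⟨u, hu, hadj⟩, h3⟩)
            · by_cases hq : t ∈ Q
              · exact List.mem_append_left _ hq
              · refine List.mem_append_right _ ((hmemnews t).2 ⟨hadj, h1, ?_⟩)
                rw [PySem.Dict.contains_eq_isSome_get?]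
                cases hiso : (dist.get? t).isSome
                · rfl
                · exact absurd ((hdom t).1 hiso) (by rintro (hv | hq'); exacts [h3 hv, hq hq']))
        (by
          rw [List.nodup_append]
          refine ⟨hQnd, ?_, ?_⟩
          · rw [hnews]
            refine ((pvNbr_nodup s.1 s.2.1).filter _).map ?_
            intro a b h
            simp only [Prod.mk.injEq] at h
            exact Prod.ext h.1 h.2.1
          · intro t ht t' ht' heq2
            subst heq2
            have h1 := (hdom t).2 (Or.inr ht)
            rw [hnews_fresh t ht'] at h1
            exact Bool.false_ne_true h1)
        (by
          intro t
          rw [hf2 t]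
          by_cases hn : t ∈ news
          · rw [if_pos hn]
            simp only [Option.isSome_some, true_iff]
            exact Or.inr (List.mem_append_right _ hn)
          · rw [if_neg hn, hdom t, List.mem_append]
            constructor
            · rintro (hv | hq); exacts [Or.inl hv, Or.inr (Or.inl hq)]
            · rintro (hv | hq | hn')
              exacts [Or.inl hv, Or.inr hq, absurd hn' hn])
        (by
          intro u hu
          have husome : (dist.get? u).isSome = true :=
            (hdom u).2 (Or.inl ⟨k, le_refl _, hP u (List.mem_cons_of_mem _ hu)⟩)
          rw [PySem.Dict.getD_eq_get?_getD, hf2 u, if_neg (hnot_news u husome),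
            ← PySem.Dict.getD_eq_get?_getD]
          exact hvalP u (List.mem_cons_of_mem _ hu))
        (by
          intro t ht
          rcases List.mem_append.1 ht with hq | hn
          · have htsome : (dist.get? t).isSome = true := (hdom t).2 (Or.inr hq)
            rw [PySem.Dict.getD_eq_get?_getD, hf2 t, if_neg (hnot_news t htsome),
              ← PySem.Dict.getD_eq_get?_getD]
            exact hvalQ t hq
          · rw [PySem.Dict.getD_eq_get?_getD, hf2 t, if_pos hn]
            rw [hd]
            rfl)
        (by rw [List.length_cons] at hfuel; omega)
    refine ⟨Q', dist', ?_, hmem', hnd', hdom'', hval'', ?_⟩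
    · rw [hstep, hf1, List.append_assoc, heq, List.length_cons, Nat.succ_sub_succ]
      congr 1
      simp
    · intro t hsome
      have hnn := hnot_news t hsome
      have h2 : ((pvNbr s.1 s.2.1).foldl
          (fun acc c =>
            if List.contains (PySem.Set.ofList input) c && !(acc.2.contains (c.1, c.2, 1 - s.2.2)) then
              (acc.1 ++ [(c.1, c.2, 1 - s.2.2)], acc.2.insert (c.1, c.2, 1 - s.2.2) (dist.getD s 0 + 1))
            else acc) (P' ++ Q, dist)).2.get? t = dist.get? t := by
        rw [hf2 t, if_neg hnn]
      rw [hext' t (by rw [h2]; exact hsome), h2]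

lemma pvLayerLen (input plots : List (Int × Int)) (k : Nat) (Q' : List (Int × Int × Int))
    (hnd : Q'.Nodup) (hm : ∀ t, t ∈ Q' ↔ pvInL input plots (k + 1) t) :
    Q'.length = (pvL input plots (k + 1)).length := by
  have hperm : Q'.Perm (pvStates input plots (k + 1)) :=
    (List.perm_ext_iff_of_nodup hnd (nodup_pvStates input plots (k + 1))).2
      (fun t => (hm t).trans (mem_pvStates input plots (k + 1) t).symm)
  rw [hperm.length_eq]
  simp [pvStates]

-- running B's queue from the start of layer k to exhaustion
lemma pvBFS_run (input plots : List (Int × Int)) :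
    ∀ (g k : Nat) (K done : List (Int × Int × Int)) (dist : PySem.Dict (Int × Int × Int) Int)
      (fuel : Nat),
    pvM input plots ≤ k + g →
    (∀ s, s ∈ K ↔ pvInL input plots k s) →
    K.length = (if k = 0 then plots.length else (pvL input plots k).length) →
    (∀ t, (dist.get? t).isSome = true ↔ pvVis input plots k t) →
    (∀ j t, j ≤ k → pvInL input plots j t → dist.getD t 0 = (j : Int)) →
    K.length + ((List.range g).map (fun i => (pvL input plots (k + 1 + i)).length)).sum ≤ fuel →
    ∃ (R : List (Int × Int × Int)) (dist' : PySem.Dict (Int × Int × Int) Int),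
      pvBFS (PySem.Set.ofList input) fuel done K dist = (done ++ K ++ R, dist') ∧
      ((K ++ R).map (fun s => dist'.getD s 0))
        = (List.range (pvM input plots - k)).flatMap
            (fun i => List.replicate
              (if k + i = 0 then plots.length else (pvL input plots (k + i)).length)
              ((k + i : Nat) : Int)) ∧
      (∀ t, (dist.get? t).isSome = true → dist'.get? t = dist.get? t) := by
  intro g
  induction g with
  | zero =>
    intro k K done dist fuel hM hK hKlen hdom hval hfuel
    have hLk : pvL input plots k = [] := pvM_empty_ge input plots (by omega)
    have hKnil : K = [] := by
      refine List.eq_nil_iff_forall_not_mem.2 ?_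
      intro s hs
      have := ((hK s).1 hs).1
      rw [hLk] at this
      exact List.not_mem_nil this
    subst hKnil
    refine ⟨[], dist, by rw [pvBFS_nil]; simp, ?_, fun t _ => rfl⟩
    rw [(by omega : pvM input plots - k = 0)]
    rfl
  | succ g ih =>
    intro k K done dist fuel hM hK hKlen hdom hval hfuel
    rcases Nat.lt_or_ge k (pvM input plots) with hkM | hkM
    · -- process layer k, then recurse
      obtain ⟨Q', dist'', heq, hmem', hnd', hdom'', hval'', hext'⟩ :=
        pvBFS_layer input plots k K (fun _ => False) [] done dist fuel
          (fun s hs => (hK s).1 hs)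
          (fun s hs => hs.elim)
          (fun s hs => Or.inr ((hK s).2 hs))
          (by intro t; simp)
          (List.nodup_nil)
          (by intro t; rw [hdom t]; simp)
          (fun s hs => hval k s (le_refl k) ((hK s).1 hs))
          (by intro t ht; exact absurd ht (List.not_mem_nil))
          (by omega)
      rw [List.append_nil] at heq
      have hQlen : Q'.length = (pvL input plots (k + 1)).length :=
        pvLayerLen input plots k Q' hnd' hmem'
      have hsum : ((List.range (g + 1)).map (fun i => (pvL input plots (k + 1 + i)).length)).sum
          = (pvL input plots (k + 1)).length
            + ((List.range g).map (fun i => (pvL input plots (k + 1 + 1 + i)).length)).sum := by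
        rw [List.range_succ_eq_map, List.map_cons, List.sum_cons, List.map_map]
        congr 2
        refine List.map_congr_left ?_
        intro i _
        simp only [Function.comp]
        rw [show k + 1 + i.succ = k + 1 + 1 + i by omega]
      obtain ⟨R', dist3, heq2, hmap, hext3⟩ :=
        ih (k + 1) Q' (done ++ K) dist'' (fuel - K.length)
          (by omega)
          hmem'
          (by rw [if_neg (by omega : ¬ k + 1 = 0)]; exact hQlen)
          hdom''
          (by
            intro j t hj ht
            rcases Nat.lt_or_ge j (k + 1) with hjk | hjk
            · have hsome : (dist.get? t).isSome = true := (hdom t).2 ⟨j, by omega, ht⟩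
              rw [PySem.Dict.getD_eq_get?_getD, hext' t hsome, ← PySem.Dict.getD_eq_get?_getD]
              exact hval j t (by omega) ht
            · have : j = k + 1 := by omega
              subst this
              rw [hval'' t ((hmem' t).2 ht)]
              push_cast
              ring)
          (by rw [hsum] at hfuel; omega)
      have hext : ∀ t, (dist.get? t).isSome = true → dist3.get? t = dist.get? t := by
        intro t hsome
        have h1 := hext' t hsome
        have h2 : (dist''.get? t).isSome = true := by rw [h1]; exact hsome
        rw [hext3 t h2, h1]
      refine ⟨Q' ++ R', dist3, ?_, ?_, hext⟩
      · rw [heq, heq2]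
        simp [List.append_assoc]
      · have hKval : ∀ s ∈ K, dist3.getD s 0 = ((k : Nat) : Int) := by
          intro s hs
          have hsome : (dist.get? s).isSome = true :=
            (hdom s).2 ⟨k, le_refl _, (hK s).1 hs⟩
          rw [PySem.Dict.getD_eq_get?_getD, hext s hsome, ← PySem.Dict.getD_eq_get?_getD]
          exact hval k s (le_refl _) ((hK s).1 hs)
        have hKmap : K.map (fun s => dist3.getD s 0) = List.replicate K.length ((k : Nat) : Int) := by
          rw [show K.length = (K.map (fun s => dist3.getD s 0)).length from by simp]
          refine List.eq_replicate_of_mem ?_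
          intro b hb
          obtain ⟨s, hsK, rfl⟩ := List.mem_map.1 hb
          exact hKval s hsK
        rw [show K ++ (Q' ++ R') = K ++ (Q' ++ R') from rfl, List.map_append, hKmap, hmap]
        rw [show pvM input plots - k = (pvM input plots - (k + 1)) + 1 by omega]
        rw [List.range_succ_eq_map, List.flatMap_cons]
        congr 1
        · rw [Nat.add_zero, hKlen]
        · rw [List.flatMap_map]
          congr 1
          funext i
          rw [show k + i.succ = k + 1 + i by omega]
    · -- all layers are already exhausted
      have hLk : pvL input plots k = [] := pvM_empty_ge input plots (by omega)
      have hKnil : K = [] := by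
        refine List.eq_nil_iff_forall_not_mem.2 ?_
        intro s hs
        have := ((hK s).1 hs).1
        rw [hLk] at this
        exact List.not_mem_nil this
      subst hKnil
      refine ⟨[], dist, by rw [pvBFS_nil]; simp, ?_, fun t _ => rfl⟩
      rw [(by omega : pvM input plots - k = 0)]
      rfl

-- ---------- final assembly ----------

lemma pvPyRange_natCast (n : Nat) :
    PySem.List.pyRange 0 (n : Int) 1 = (List.range n).map (fun j => (j : Int)) := by
  unfold PySem.List.pyRange
  rw [if_neg one_ne_zero]
  simp only [if_pos zero_lt_one]
  by_cases h : (0 : Int) < (n : Int)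
  · rw [if_pos h]
    have h1 : ((n : Int) - 0 + 1 - 1) / 1 = (n : Int) := by
      rw [Int.ediv_one]; ring
    rw [h1, Int.toNat_natCast]
    simp
    induction List.range n with
    | nil => rfl
    | cons a l ih => simp [ih]
  · have h0 : n = 0 := by omega
    subst h0
    rw [if_neg h]
    rfl

lemma pvSetRepl (m : Nat) (x : Int) :
    PySem.Set.ofList (List.replicate (m + 1) x) = [x] := by
  induction m with
  | zero => rfl
  | succ m ih =>
    rw [show List.replicate (m + 1 + 1) x = List.replicate (m + 1) x ++ [x] from
        List.replicate_succ', PySem.Set.ofList_append_singleton, ih,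
      PySem.Set.add_of_mem (by simp)]

lemma pvOfListH (cnt : Nat → Nat) :
    ∀ n : Nat, (∀ j < n, 1 ≤ cnt j) →
    PySem.Set.ofList ((List.range n).flatMap (fun j => List.replicate (cnt j) ((j : Nat) : Int)))
      = (List.range n).map (fun j => ((j : Nat) : Int)) := by
  intro n
  induction n with
  | zero => intro _; rfl
  | succ n ih =>
    intro h
    rw [List.range_succ, List.flatMap_append, List.flatMap_cons, List.flatMap_nil,
      List.append_nil, PySem.Set.ofList_append, ih (fun j hj => h j (by omega)),
      PySem.Set.update_eq_append_filter]
    obtain ⟨m, hm⟩ : ∃ m, cnt n = m + 1 := ⟨cnt n - 1, by have := h n (by omega); omega⟩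
    rw [hm, pvSetRepl]
    rw [List.map_append]
    congr 1
    have hnot : ((List.range n).map (fun j => ((j : Nat) : Int))).contains ((n : Nat) : Int) = false := by
      rw [List.contains_eq_mem]
      simp only [decide_eq_false_iff_not, List.mem_map, List.mem_range]
      rintro ⟨j, hj, hcast⟩
      omega
    simp [PySem.Set.contains_eq_listContains, hnot]

lemma pvCountH (cnt : Nat → Nat) (j : Nat) :
    ∀ n : Nat,
    ((List.range n).flatMap (fun i => List.replicate (cnt i) ((i : Nat) : Int))).count ((j : Nat) : Int)
      = if j < n then cnt j else 0 := by
  intro n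
  induction n with
  | zero => simp
  | succ n ih =>
    rw [List.range_succ, List.flatMap_append, List.flatMap_cons, List.flatMap_nil,
      List.append_nil, List.count_append, ih, List.count_replicate]
    by_cases hj : j = n
    · subst hj
      simp [Nat.lt_irrefl]
    · have hne : (((n : Nat) : Int) == ((j : Nat) : Int)) = false := by
        simp only [beq_eq_false_iff_ne, ne_eq, Int.natCast_inj]
        omega
      rw [hne]
      simp only [Bool.false_eq_true, if_false, Nat.add_zero]
      by_cases h2 : j < n
      · rw [if_pos h2, if_pos (by omega)]
      · rw [if_neg h2, if_neg (by omega)]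

lemma simulate_block_eq (input plots : List (Int × Int)) (h : input ≠ []) :
    simulate_block input plots
      = (pvPass2 ((List.range (pvM input plots)).map
          (fun i => ((pvL input plots i).length : Int)))).1 := by
  unfold simulate_block
  have h1 : PySem.List.max? (input.map (fun p => p.1)) (fun y => y) ≠ none := fun hn =>
    h (by simpa using (PySem.List.max?_eq_none_iff _ _).1 hn)
  have h2 : PySem.List.max? (input.map (fun p => p.2)) (fun x => x) ≠ none := fun hn =>
    h (by simpa using (PySem.List.max?_eq_none_iff _ _).1 hn)
  obtain ⟨m1, hm1⟩ := Option.ne_none_iff_exists'.1 h1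
  obtain ⟨m2, hm2⟩ := Option.ne_none_iff_exists'.1 h2
  rw [hm1, hm2]
  have hA := pvLoopA_eq input plots (plots.length + 2 * input.length + 4) 0 []
  rw [pvLens_spec input plots (plots.length + 2 * input.length + 4) 0
    (by have := pvM_le input plots; omega)] at hA
  have hfun : (fun i => ((pvL input plots (0 + i)).length : Int))
      = (fun i => ((pvL input plots i).length : Int)) := by
    funext i; rw [Nat.zero_add]
  rw [hfun] at hA
  exact hA

lemma pvMem_pyRange {n : Nat} {d : Int}
    (hd : d ∈ PySem.List.pyRange 0 (n : Int) 1) : ∃ j : Nat, j < n ∧ ((j : Nat) : Int) = d := by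
  rw [pvPyRange_natCast] at hd
  simp only [List.map_id', List.bind_eq_flatMap, List.mem_flatMap, List.mem_range] at hd
  obtain ⟨a, ha, hda⟩ := hd
  simp only [pure, List.pure_def, List.mem_cons, List.not_mem_nil, or_false] at hda
  exact ⟨a, ha, hda.symm⟩

lemma simulate_block_alt_eq (input plots : List (Int × Int)) :
    simulate_block_alt input plots
      = (pvPass2 ((List.range (pvM input plots)).map
          (fun i => ((pvL input plots i).length : Int)))).1 := by
  obtain ⟨hs1, hs2⟩ := pvSeeds plots [] PySem.Dict.empty
  rw [List.nil_append] at hs1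
  -- K characterisation
  have hKmem : ∀ s : Int × Int × Int,
      s ∈ plots.map (fun c => ((c.1, c.2, (0 : Int)) : Int × Int × Int)) ↔
        pvInL input plots 0 s := by
    intro s; obtain ⟨y, x, p⟩ := s
    simp only [List.mem_map, pvInL, pvL_zero, pvPar_zero]
    constructor
    · rintro ⟨c, hc, hh⟩
      simp only [Prod.mk.injEq] at hh
      obtain ⟨e1, e2, e3⟩ := hh; subst e1; subst e2; subst e3
      exact ⟨by simpa using hc, rfl⟩
    · rintro ⟨h1, h2⟩
      exact ⟨(y, x), by simpa using h1, by simp [h2]⟩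
  have hdom0 : ∀ t, (((plots.foldl (fun (acc : List (Int × Int × Int) × PySem.Dict (Int × Int × Int) Int) c =>
        (acc.1 ++ [(c.1, c.2, (0 : Int))], acc.2.insert (c.1, c.2, (0 : Int)) 0))
        ([], PySem.Dict.empty)).2).get? t).isSome = true ↔ pvVis input plots 0 t := by
    intro t
    rw [hs2 t, pvVis_zero]
    by_cases hmem : t ∈ plots.map (fun c => ((c.1, c.2, (0 : Int)) : Int × Int × Int))
    · rw [if_pos hmem]
      simpa using (hKmem t).1 hmem
    · rw [if_neg hmem]
      simp only [PySem.Dict.get?_empty, Option.isSome_none, Bool.false_eq_true, false_iff]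
      exact fun hl => hmem ((hKmem t).2 hl)
  have hval0 : ∀ (j : Nat) (t : Int × Int × Int), j ≤ 0 → pvInL input plots j t →
      ((plots.foldl (fun (acc : List (Int × Int × Int) × PySem.Dict (Int × Int × Int) Int) c =>
        (acc.1 ++ [(c.1, c.2, (0 : Int))], acc.2.insert (c.1, c.2, (0 : Int)) 0))
        ([], PySem.Dict.empty)).2).getD t 0 = (j : Int) := by
    intro j t hj ht
    have hj0 : j = 0 := by omega
    subst hj0
    rw [PySem.Dict.getD_eq_get?_getD, hs2 t, if_pos ((hKmem t).2 ht)]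
    rfl
  obtain ⟨R, dist', heq, hmap, -⟩ :=
    pvBFS_run input plots (pvM input plots) 0
      (plots.map (fun c => ((c.1, c.2, (0 : Int)) : Int × Int × Int))) []
      ((plots.foldl (fun (acc : List (Int × Int × Int) × PySem.Dict (Int × Int × Int) Int) c =>
        (acc.1 ++ [(c.1, c.2, (0 : Int))], acc.2.insert (c.1, c.2, (0 : Int)) 0))
        ([], PySem.Dict.empty)).2)
      (plots.length + 2 * input.length + 4)
      (by omega)
      hKmem
      (by rw [if_pos rfl, List.length_map])
      hdom0
      hval0
      (by
        rw [List.length_map]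
        have hs := pvSum_le input plots (pvM input plots)
        have : ((List.range (pvM input plots)).map
              (fun i => (pvL input plots (0 + 1 + i)).length)).sum
            = ((List.range (pvM input plots)).map
              (fun i => (pvL input plots (1 + i)).length)).sum := by
          congr 1
        rw [this]
        omega)
  -- clean up the histogram description
  have hHfun : (fun i => List.replicate
        (if 0 + i = 0 then plots.length else (pvL input plots (0 + i)).length)
        (((0 + i : Nat) : Int)))
      = (fun i => List.replicate ((pvL input plots i).length) ((i : Nat) : Int)) := by
    funext i
    rw [Nat.zero_add]
    cases i with
    | zero => rfl
    | succ n => rfl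
  rw [Nat.sub_zero, hHfun] at hmap
  -- the keys / size / values of the histogram counter
  have hne : ∀ j < pvM input plots, 1 ≤ (pvL input plots j).length := by
    intro j hj
    exact List.length_pos_of_ne_nil (pvM_ne input plots hj)
  have hkeys : (PySem.Dict.counter ((List.range (pvM input plots)).flatMap
        (fun i => List.replicate ((pvL input plots i).length) ((i : Nat) : Int)))).keys
      = (List.range (pvM input plots)).map (fun j => ((j : Nat) : Int)) := by
    rw [PySem.Dict.keys_counter]
    exact pvOfListH (fun i => (pvL input plots i).length) (pvM input plots) hne
  have hsize : (PySem.Dict.counter ((List.range (pvM input plots)).flatMap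
        (fun i => List.replicate ((pvL input plots i).length) ((i : Nat) : Int)))).size
      = pvM input plots := by
    have h1 : ∀ (d : PySem.Dict Int Int), d.size = d.keys.length := by
      intro d; simp [PySem.Dict.size, PySem.Dict.keys]
    rw [h1, hkeys, List.length_map, List.length_range]
  have hgetD : ∀ j < pvM input plots,
      (PySem.Dict.counter ((List.range (pvM input plots)).flatMap
        (fun i => List.replicate ((pvL input plots i).length) ((i : Nat) : Int)))).getD
          ((j : Nat) : Int) 0 = ((pvL input plots j).length : Int) := by
    intro j hj
    rw [PySem.Dict.getD_counter, pvCountH (fun i => (pvL input plots i).length) j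
      (pvM input plots), if_pos hj]
  -- now unfold the port and rewrite piece by piece
  simp only [simulate_block_alt]
  rw [hs1, heq]
  dsimp only
  rw [List.nil_append]
  have hfold : (plots.map (fun c => ((c.1, c.2, (0 : Int)) : Int × Int × Int)) ++ R).foldl
        (fun sz s => sz.insert (dist'.getD s 0) (sz.getD (dist'.getD s 0) 0 + 1))
        PySem.Dict.empty
      = PySem.Dict.counter ((plots.map (fun c => ((c.1, c.2, (0 : Int)) : Int × Int × Int)) ++ R).map
          (fun s => dist'.getD s 0)) := by
    rw [← PySem.Dict.foldl_insert_getD_add_one_eq_counter, List.foldl_map]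
  rw [hfold, hmap, hsize]
  -- the counts pass equals pvPass2 of the layer sizes
  have hlen : PySem.List.len ((List.range (pvM input plots)).map
      (fun i => ((pvL input plots i).length : Int))) = ((pvM input plots : Nat) : Int) := by
    simp [PySem.List.len]
  have hxsget : ∀ j < pvM input plots,
      PySem.List.pyGetD ((List.range (pvM input plots)).map
        (fun i => ((pvL input plots i).length : Int))) ((j : Nat) : Int) 0
      = ((pvL input plots j).length : Int) := by
    intro j hj
    rw [PySem.List.pyGetD_natCast]
    rw [List.getD_eq_getElem _ _ (by simpa using hj)]
    simp
  have hres : (PySem.List.pyRange 0 ((pvM input plots : Nat) : Int) 1).foldl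
      (fun (acc : List Int × Int × Int) d =>
        if (PySem.Int.mod d 2 == 0) = true then
          (acc.1 ++ [acc.2.1 + (PySem.Dict.counter ((List.range (pvM input plots)).flatMap
            (fun i => List.replicate ((pvL input plots i).length) ((i : Nat) : Int)))).getD d 0],
            acc.2.1 + (PySem.Dict.counter ((List.range (pvM input plots)).flatMap
            (fun i => List.replicate ((pvL input plots i).length) ((i : Nat) : Int)))).getD d 0,
            acc.2.2)
        else
          (acc.1 ++ [acc.2.2 + (PySem.Dict.counter ((List.range (pvM input plots)).flatMap
            (fun i => List.replicate ((pvL input plots i).length) ((i : Nat) : Int)))).getD d 0],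
            acc.2.1,
            acc.2.2 + (PySem.Dict.counter ((List.range (pvM input plots)).flatMap
            (fun i => List.replicate ((pvL input plots i).length) ((i : Nat) : Int)))).getD d 0))
      ([], 0, 0)
      = pvPass2 ((List.range (pvM input plots)).map
          (fun i => ((pvL input plots i).length : Int))) := by
    rw [PySem.List.foldl_congr_mem _ _
      (fun (acc : List Int × Int × Int) d => pvStep acc (d, PySem.List.pyGetD
        ((List.range (pvM input plots)).map (fun i => ((pvL input plots i).length : Int))) d 0))
      _
      (by
        intro acc d hd
        obtain ⟨j, hj, rfl⟩ := pvMem_pyRange hd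
        unfold pvStep
        dsimp only
        rw [hxsget j hj, hgetD j hj])]
    unfold pvPass2
    rw [PySem.List.enumerate_eq_map_pyRange _ 0, hlen, List.foldl_map]
  rw [hres]

-- ===== VERDICT (by name: the statements are the Claim_ definitions above) =====
theorem simulate_block_spec : Claim_equal_simulate_block := by
  intro input plots _ hpre
  unfold Spec_simulate_block
  rw [simulate_block_eq input plots hpre, simulate_block_alt_eq input plots]

@[simp] theorem simulate_block_raises : Claim_raises_simulate_block := by
  unfold Claim_raises_simulate_block
  exact ⟨fun _ _ _ h => by simpa [Pre_simulate_block] using h, by decide⟩
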